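-- pv_equiv track=rewrite | github.com/xnlsbunyu/BC_parser | bc_filter.py | mismatch_re
-- ===== SOURCE A (Python) =====
-- def mismatch_re(s, mis):
--     import itertools
--     import re
--     all_list = []
--     mismatch_pos = itertools.combinations(range(len(s)), mis)
--     for i in mismatch_pos:
--         temp_s = s
--         for pos in i:
--             temp_s = "".join((temp_s[:pos], ".", temp_s[pos+1:]))
--         all_list.append(temp_s)
--     return '|'.join(all_list)
-- ===== SOURCE B (Python) =====
-- def mismatch_re(s, mis):
--     n = len(s)
--     def build(i, k):
--         # all wildcard variants of s[i:] with exactly k positions replaced by '.'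
--         if k == 0:
--             return [s[i:]]
--         if n - i < k:
--             return []
--         return ['.' + t for t in build(i + 1, k - 1)] + [s[i] + t for t in build(i + 1, k)]
--     return '|'.join(build(0, mis))
-- ===== Notes on version B (the rewrite author's own statement) =====
-- stated objective: alternative
-- what changed: B drops itertools.combinations and the per-combination slice-splicing loop: one recursion over the string simultaneously chooses k wildcard positions and builds each variant front-to-back in the same lexicographic order.
import Mathlib
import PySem

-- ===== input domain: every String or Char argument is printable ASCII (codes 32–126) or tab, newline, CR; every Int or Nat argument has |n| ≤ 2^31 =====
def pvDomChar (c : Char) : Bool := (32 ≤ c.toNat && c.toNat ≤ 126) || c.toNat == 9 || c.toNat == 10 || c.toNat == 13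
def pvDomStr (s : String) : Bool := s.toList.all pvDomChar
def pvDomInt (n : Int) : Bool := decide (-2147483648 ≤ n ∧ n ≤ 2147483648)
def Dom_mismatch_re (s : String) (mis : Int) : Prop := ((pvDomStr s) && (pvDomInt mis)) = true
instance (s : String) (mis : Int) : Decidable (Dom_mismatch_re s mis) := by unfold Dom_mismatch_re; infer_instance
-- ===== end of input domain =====

-- B replaces A's "splice '.' into a copy for each chosen position of each itertools combination"
-- by one recursion over the string that chooses/skips wildcard positions while building each
-- variant front-to-back (alternative decomposition, same cost).


-- ===== PORT A =====
-- itertools.combinations(l, k) in lexicographic order (exact for a duplicate-free l such as range)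
def pyCombinations : List Nat → Nat → List (List Nat)
  | _, 0 => [[]]
  | [], _ + 1 => []
  | x :: xs, k + 1 => (pyCombinations xs k).map (x :: ·) ++ pyCombinations xs (k + 1)

-- temp_s = "".join((temp_s[:pos], ".", temp_s[pos+1:]))  (exact: pos is a nonnegative in-range index)
def spliceDot (t : List Char) (pos : Nat) : List Char :=
  t.take pos ++ ['.'] ++ t.drop (pos + 1)

def mismatch_re (s : String) (mis : Int) : String :=
  let cs := s.toList
  let mismatch_pos := pyCombinations (List.range cs.length) mis.toNat
  let all_list := mismatch_pos.map (fun i => i.foldl spliceDot cs)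
  String.intercalate "|" (all_list.map String.mk)

-- ===== PORT B =====
-- build(i, k) over the suffix s[i:], represented structurally as the suffix list
def buildB : List Char → Nat → List (List Char)
  | cs, 0 => [cs]
  | [], _ + 1 => []
  | c :: rest, k + 1 =>
    if rest.length + 1 < k + 1 then []
    else (buildB rest k).map ('.' :: ·) ++ (buildB rest (k + 1)).map (c :: ·)

def mismatch_re_alt (s : String) (mis : Int) : String :=
  String.intercalate "|" ((buildB s.toList mis.toNat).map String.mk)

-- ===== PRECONDITION & SPEC =====
-- Pre_ excludes mis < 0, on which A raises ValueError (itertools.combinations rejects negative r).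
def Pre_mismatch_re (s : String) (mis : Int) : Prop := 0 ≤ mis
instance (s : String) (mis : Int) : Decidable (Pre_mismatch_re s mis) := by
  unfold Pre_mismatch_re; infer_instance
def pvWitness_mismatch_re : String × Int := ("abc", 2)

def Spec_mismatch_re (s : String) (mis : Int) (out : String) : Prop := out = mismatch_re_alt s mis
instance (s : String) (mis : Int) (out : String) : Decidable (Spec_mismatch_re s mis out) := by
  unfold Spec_mismatch_re; infer_instance

-- ===== CLAIM (what is proved, stated in full; the proofs are below) =====
def Claim_equal_mismatch_re : Prop := ∀ (s : String) (mis : Int), Dom_mismatch_re s mis → Pre_mismatch_re s mis → Spec_mismatch_re s mis (mismatch_re s mis)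

-- ===== LEMMAS AND PROOFS =====

theorem pyCombinations_nil_of_lt : ∀ (l : List Nat) (k : Nat), l.length < k → pyCombinations l k = [] := by
  intro l
  induction l with
  | nil => intro k h; cases k with
    | zero => omega
    | succ k => rfl
  | cons x xs ih =>
    intro k h
    cases k with
    | zero => omega
    | succ k =>
      simp only [List.length_cons] at h
      simp only [pyCombinations]
      rw [ih k (by omega), ih (k + 1) (by omega)]
      simp

theorem pyCombinations_map (f : Nat → Nat) : ∀ (l : List Nat) (k : Nat),
    pyCombinations (l.map f) k = (pyCombinations l k).map (List.map f) := by
  intro l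
  induction l with
  | nil => intro k; cases k <;> rfl
  | cons x xs ih =>
    intro k
    cases k with
    | zero => rfl
    | succ k =>
      simp only [List.map_cons, pyCombinations, ih, List.map_append, List.map_map]
      rfl

theorem pyCombinations_zero (l : List Nat) : pyCombinations l 0 = [[]] := by
  cases l <;> rfl

theorem spliceDot_succ_cons (c : Char) (t : List Char) (q : Nat) :
    spliceDot (c :: t) (q + 1) = c :: spliceDot t q := by
  simp [spliceDot]

theorem foldl_spliceDot_shift : ∀ (qs : List Nat) (c : Char) (t : List Char),
    (qs.map Nat.succ).foldl spliceDot (c :: t) = c :: qs.foldl spliceDot t := by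
  intro qs
  induction qs with
  | nil => intro c t; rfl
  | cons q qs ih =>
    intro c t
    simp only [List.map_cons, List.foldl_cons]
    rw [show spliceDot (c :: t) (Nat.succ q) = c :: spliceDot t q from spliceDot_succ_cons c t q, ih]

theorem buildB_eq : ∀ (cs : List Char) (k : Nat),
    buildB cs k = (pyCombinations (List.range cs.length) k).map (fun i => i.foldl spliceDot cs) := by
  intro cs
  induction cs with
  | nil =>
    intro k
    cases k with
    | zero => rfl
    | succ k => rfl
  | cons c rest ih =>
    intro k
    cases k with
    | zero => simp [buildB, pyCombinations_zero]
    | succ k =>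
      simp only [buildB]
      by_cases h : rest.length + 1 < k + 1
      · rw [if_pos h, pyCombinations_nil_of_lt _ (k + 1) (by simpa using h)]
        rfl
      · rw [if_neg h]
        have hr : List.range (c :: rest).length = 0 :: (List.range rest.length).map Nat.succ := by
          simp [List.range_succ_eq_map]
        rw [hr]
        simp only [pyCombinations, pyCombinations_map, List.map_append, List.map_map]
        congr 1
        · rw [ih k]
          simp only [List.map_map]
          apply List.map_congr_left
          intro q _
          simp only [Function.comp_apply, List.foldl_cons]
          have h0 : spliceDot (c :: rest) 0 = '.' :: rest := by simp [spliceDot]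
          rw [h0, foldl_spliceDot_shift]
        · rw [ih (k + 1)]
          simp only [List.map_map]
          apply List.map_congr_left
          intro q _
          simp only [Function.comp_apply]
          rw [foldl_spliceDot_shift]

-- ===== VERDICT (by name: the statement is the Claim_ definition above) =====
theorem mismatch_re_spec : Claim_equal_mismatch_re := by
  intro s mis _ _
  unfold Spec_mismatch_re mismatch_re mismatch_re_alt
  rw [buildB_eq]
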